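-- pv_equiv track=rewrite | github.com/JuRehl/Teoria-De-algoritmos-buchwald-FIUBA | Primer parcial/Programacion dinamica/bodegon_dinamico.py | bodegon_dinamico
-- ===== SOURCE A (Python) =====
-- def bodegon_dinamico(P, W):
--     n=len(P)
--     dp=[[0]*(W+1) for _ in range(n+1)]
--
--     for i in range(1,n+1):
--         personas=P[i-1]
--         for j in range(W+1):
--             if personas>j:
--                 dp[i][j]=dp[i-1][j]
--             else:
--                 dp[i][j]=max(dp[i-1][j],dp[i-1][j-personas]+personas)
--     return reconstruir(P,W,dp)
--
-- def reconstruir(P,W,dp):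
--     result=[]
--     i,j=len(P),W
--     while i>0 and j>0:
--         if dp[i][j]!=dp[i-1][j]:
--             grupo = P[i - 1]
--             result.append(grupo)
--             j -= grupo
--         i-=1
--     result.reverse()
--     return result
-- ===== SOURCE B (Python) =====
-- def bodegon_dinamico(P, W):
--     # Reachable-subset-sums DP: layers[i] is the set of every subset sum of the
--     # first i groups that fits in W; the answer is rebuilt by comparing the best
--     # reachable sum <= j before and after each group (no value table at all).
--     if W < 0:
--         return []
--     reach = {0}
--     layers = [reach]
--     for p in P:
--         reach = reach | {s + p for s in reach if s + p <= W}
--         layers.append(reach)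
--     res = []
--     j = W
--     for i in range(len(P), 0, -1):
--         if j <= 0:
--             break
--         if _maxle(layers[i], j) != _maxle(layers[i - 1], j):
--             res.append(P[i - 1])
--             j -= P[i - 1]
--     res.reverse()
--     return res
--
-- def _maxle(S, j):
--     m = 0
--     for s in S:
--         if s <= j and m < s:
--             m = s
--     return m
-- ===== Notes on version B (the rewrite author's own statement) =====
-- stated objective: faster
-- what changed: Replaces the (n+1)x(W+1) max-value DP table with a reachable-subset-sums DP (a chain of sets of achievable sums <= W, one per prefix) and reconstructs by comparing the largest reachable sum <= j before and after each group; work per item is proportional to the number of reachable sums, not to W.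
import Mathlib
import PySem

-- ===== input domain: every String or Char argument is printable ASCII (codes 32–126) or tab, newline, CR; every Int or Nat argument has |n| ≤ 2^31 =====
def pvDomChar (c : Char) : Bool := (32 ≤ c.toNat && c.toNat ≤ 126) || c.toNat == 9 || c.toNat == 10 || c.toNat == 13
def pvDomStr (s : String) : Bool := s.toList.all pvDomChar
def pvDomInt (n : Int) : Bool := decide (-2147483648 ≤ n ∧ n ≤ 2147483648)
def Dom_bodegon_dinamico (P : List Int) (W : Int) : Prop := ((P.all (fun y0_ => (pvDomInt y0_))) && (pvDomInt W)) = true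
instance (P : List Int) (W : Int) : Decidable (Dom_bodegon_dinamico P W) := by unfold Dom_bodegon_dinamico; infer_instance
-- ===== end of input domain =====

-- B replaces A's max-value DP table by a chain of reachable-subset-sum SETS (one per
-- prefix, sums pruned at W) and reconstructs by comparing the largest reachable sum ≤ j
-- before and after each group, doing per-item work proportional to the reachable-sum count instead of W (objective: faster).

-- ===== PORT A =====
-- dp=[[0]*(W+1) for _ in range(n+1)] : row 0 of the table
def pvRow0 (W : Int) : List Int := List.replicate (W + 1).toNat 0

-- the inner 'for j in range(W+1)' filling row i from row i-1 (indices in range under Pre_,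
-- so list indexing is ported with getD)
def pvRowA (prev : List Int) (p W : Int) : List Int :=
  (List.range (W + 1).toNat).map (fun (j : Nat) =>
    if p > (j : Int) then prev.getD j 0
    else max (prev.getD j 0) (prev.getD (((j : Int) - p).toNat) 0 + p))

-- the outer 'for i in range(1,n+1)' building rows 1..n
def pvBuild (W : Int) : List Int → List Int → List (List Int)
  | _, [] => []
  | prev, p :: rest =>
      let r := pvRowA prev p W
      r :: pvBuild W r rest

def pvDp (P : List Int) (W : Int) : List (List Int) := pvRow0 W :: pvBuild W (pvRow0 W) P

-- reconstruir: while i>0 and j>0, appending then reversing at the end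
def pvRecon (P : List Int) (dp : List (List Int)) : Nat → Int → List Int → List Int
  | 0, _, acc => acc
  | i + 1, j, acc =>
    if 0 < j then
      (if (dp.getD (i + 1) []).getD j.toNat 0 ≠ (dp.getD i []).getD j.toNat 0 then
        pvRecon P dp i (j - P.getD i 0) (acc ++ [P.getD i 0])
      else pvRecon P dp i j acc)
    else acc

def bodegon_dinamico (P : List Int) (W : Int) : List Int :=
  (pvRecon P (pvDp P W) P.length W []).reverse

-- ===== PORT B =====
-- _maxle(S, j): loop over the set keeping the largest element ≤ j (0 if none);
-- max over a set is iteration-order independent, so the list fold is exact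
def pvMaxle (S : PySem.Set Int) (j : Int) : Int :=
  S.foldl (fun m s => if s ≤ j ∧ m < s then s else m) 0

-- reach | {s + p for s in reach if s + p <= W} : union with the shifted-and-pruned set
def pvAddLayer (W : Int) (R : PySem.Set Int) (p : Int) : PySem.Set Int :=
  R.foldl (fun acc s => if s + p ≤ W then PySem.Set.add acc (s + p) else acc) R

-- one iteration of 'for p in P': shift the reachable set, append it to layers
def pvLayersStep (W : Int) (st : List (PySem.Set Int) × PySem.Set Int) (p : Int) :
    List (PySem.Set Int) × PySem.Set Int :=
  let r := pvAddLayer W st.2 p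
  (st.1 ++ [r], r)

-- 'for i in range(len(P), 0, -1)' with break on j<=0, append + reverse
def pvPickB (P : List Int) (ls : List (PySem.Set Int)) : Nat → Int → List Int → List Int
  | 0, _, acc => acc
  | i + 1, j, acc =>
    if j ≤ 0 then acc
    else if pvMaxle (ls.getD (i + 1) PySem.Set.empty) j ≠ pvMaxle (ls.getD i PySem.Set.empty) j then
      pvPickB P ls i (j - P.getD i 0) (acc ++ [P.getD i 0])
    else pvPickB P ls i j acc

def bodegon_dinamico_alt (P : List Int) (W : Int) : List Int :=
  if W < 0 then []
  else
    let ls := (P.foldl (pvLayersStep W) ([PySem.Set.ofList [0]], PySem.Set.ofList [0])).1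
    (pvPickB P ls P.length W []).reverse

-- ===== PRECONDITION & SPEC =====
-- Pre_ excludes exactly the inputs with W ≥ 0 and a negative group size in P,
-- on which A raises IndexError (dp[i-1][j-personas] indexes past the end of the row).
def Pre_bodegon_dinamico (P : List Int) (W : Int) : Prop := 0 ≤ W → ∀ p ∈ P, 0 ≤ p
instance (P : List Int) (W : Int) : Decidable (Pre_bodegon_dinamico P W) := by
  unfold Pre_bodegon_dinamico; infer_instance

def pvWitness_bodegon_dinamico : List Int × Int := ([1, 2, 3], 4)

def Spec_bodegon_dinamico (P : List Int) (W : Int) (out : List Int) : Prop :=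
  out = bodegon_dinamico_alt P W
instance (P : List Int) (W : Int) (out : List Int) : Decidable (Spec_bodegon_dinamico P W out) := by
  unfold Spec_bodegon_dinamico; infer_instance

-- ===== CLAIM (what is proved, stated in full; the proofs are below) =====
def Claim_equal_bodegon_dinamico : Prop := ∀ (P : List Int) (W : Int), Dom_bodegon_dinamico P W → Pre_bodegon_dinamico P W → Spec_bodegon_dinamico P W (bodegon_dinamico P W)

-- ===== LEMMAS AND PROOFS =====

-- the knapsack value function both programs realize (proof-side reference only)
def pvBest (P : List Int) : Nat → Int → Int
  | 0, _ => 0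
  | i + 1, j =>
      let p := P.getD i 0
      if p > j then pvBest P i j
      else max (pvBest P i j) (pvBest P i (j - p) + p)

theorem pvRow0_getD (W : Int) (m : Nat) : (pvRow0 W).getD m 0 = 0 := by
  simp [pvRow0, List.getD_eq_getElem?_getD, List.getElem?_replicate]
  split <;> simp

theorem pvRowA_spec (P : List Int) (W : Int) (i : Nat) (_hi : i < P.length)
    (hp0 : 0 ≤ P.getD i 0) (prev : List Int)
    (hprev : ∀ m : Nat, m < (W + 1).toNat → prev.getD m 0 = pvBest P i m)
    (m : Nat) (hm : m < (W + 1).toNat) :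
    (pvRowA prev (P.getD i 0) W).getD m 0 = pvBest P (i + 1) m := by
  have hget : (pvRowA prev (P.getD i 0) W).getD m 0 =
      (if P.getD i 0 > (m : Int) then prev.getD m 0
       else max (prev.getD m 0) (prev.getD (((m : Int) - P.getD i 0).toNat) 0 + P.getD i 0)) := by
    simp [pvRowA, List.getD_eq_getElem?_getD, hm]
  rw [hget, pvBest]
  by_cases hc : P.getD i 0 > (m : Int)
  · simp only [hc, if_true, hprev m hm]
  · simp only [hc, if_false]
    have h1 : ((m : Int) - P.getD i 0).toNat < (W + 1).toNat := by omega
    have h2 : ((((m : Int) - P.getD i 0).toNat : Int)) = (m : Int) - P.getD i 0 := by omega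
    rw [hprev m hm, hprev _ h1, h2]

theorem pvBuild_getD (P : List Int) (W : Int) (hP : ∀ p ∈ P, 0 ≤ p) :
    ∀ (rest : List Int) (i0 : Nat) (prev : List Int),
      rest = P.drop i0 →
      (∀ m : Nat, m < (W + 1).toNat → prev.getD m 0 = pvBest P i0 m) →
      ∀ k, k < rest.length → ∀ m : Nat, m < (W + 1).toNat →
        ((pvBuild W prev rest).getD k []).getD m 0 = pvBest P (i0 + k + 1) m := by
  intro rest
  induction rest with
  | nil => intro i0 prev _ _ k hk; simp at hk
  | cons p rest' ih =>
    intro i0 prev hrest hprev k hk m hm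
    have hi0 : i0 < P.length := by
      by_contra h
      rw [List.drop_eq_nil_of_le (by omega)] at hrest
      simp at hrest
    have hdrop : P.drop i0 = P[i0] :: P.drop (i0 + 1) := List.drop_eq_getElem_cons hi0
    rw [hdrop] at hrest
    have hp : p = P.getD i0 0 := by
      rw [List.getD_eq_getElem?_getD, List.getElem?_eq_getElem hi0]
      exact (List.cons.injEq .. ▸ hrest).1
    have hrest' : rest' = P.drop (i0 + 1) := (List.cons.injEq .. ▸ hrest).2
    have hp0 : 0 ≤ P.getD i0 0 := by
      apply hP
      rw [List.getD_eq_getElem?_getD, List.getElem?_eq_getElem hi0]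
      exact List.getElem_mem hi0
    have hprev' : ∀ m : Nat, m < (W + 1).toNat →
        (pvRowA prev p W).getD m 0 = pvBest P (i0 + 1) m := by
      intro m hm
      rw [hp]
      exact pvRowA_spec P W i0 hi0 hp0 prev hprev m hm
    cases k with
    | zero =>
      simpa using hprev' m hm
    | succ k =>
      have hk' : k < rest'.length := by simpa using hk
      have := ih (i0 + 1) (pvRowA prev p W) hrest' hprev' k hk' m hm
      have harith : i0 + 1 + k + 1 = i0 + (k + 1) + 1 := by omega
      rw [harith] at this
      simpa [pvBuild] using this

theorem pvDp_getD (P : List Int) (W : Int) (hP : ∀ p ∈ P, 0 ≤ p)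
    (i : Nat) (hi : i ≤ P.length) (m : Nat) (hm : m < (W + 1).toNat) :
    ((pvDp P W).getD i []).getD m 0 = pvBest P i m := by
  cases i with
  | zero => simpa [pvDp, pvBest] using pvRow0_getD W m
  | succ i =>
    have h0 : ∀ m : Nat, m < (W + 1).toNat → (pvRow0 W).getD m 0 = pvBest P 0 m := by
      intro m _; simpa [pvBest] using pvRow0_getD W m
    have := pvBuild_getD P W hP P 0 (pvRow0 W) (by simp) h0 i (by omega) m hm
    simpa [pvDp] using this

-- basic bounds on pvBest
theorem pvBest_nonneg (P : List Int) : ∀ (i : Nat) (j : Int), 0 ≤ j → 0 ≤ pvBest P i j := by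
  intro i
  induction i with
  | zero => intro j _; simp [pvBest]
  | succ i ih =>
    intro j hj
    rw [pvBest]
    by_cases hc : P.getD i 0 > j
    · rw [if_pos hc]; exact ih j hj
    · rw [if_neg hc]
      exact le_trans (ih j hj) (le_max_left _ _)

theorem pvBest_le (P : List Int) (hP : ∀ p ∈ P, 0 ≤ p) :
    ∀ (i : Nat), i ≤ P.length → ∀ (j : Int), 0 ≤ j → pvBest P i j ≤ j := by
  intro i
  induction i with
  | zero => intro _ j hj; simpa [pvBest] using hj
  | succ i ih =>
    intro hi j hj
    have hilen : i < P.length := by omega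
    have hp0 : 0 ≤ P.getD i 0 := by
      apply hP
      rw [List.getD_eq_getElem?_getD, List.getElem?_eq_getElem hilen]
      exact List.getElem_mem hilen
    rw [pvBest]
    by_cases hc : P.getD i 0 > j
    · rw [if_pos hc]; exact ih (by omega) j hj
    · rw [if_neg hc]
      have h1 := ih (by omega) j hj
      have h2 := ih (by omega) (j - P.getD i 0) (by omega)
      omega

-- the i-th reachable-sums layer, as a pure recursion (proof-side only)
def pureLayer (P : List Int) (W : Int) : Nat → PySem.Set Int
  | 0 => PySem.Set.ofList [0]
  | i + 1 => pvAddLayer W (pureLayer P W i) (P.getD i 0)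

theorem mem_addLayer_aux (W p x : Int) :
    ∀ (l : List Int) (acc : PySem.Set Int),
      (x ∈ l.foldl (fun acc s => if s + p ≤ W then PySem.Set.add acc (s + p) else acc) acc ↔
        x ∈ acc ∨ ∃ s ∈ l, x = s + p ∧ s + p ≤ W) := by
  intro l
  induction l with
  | nil => intro acc; simp
  | cons s t ih =>
    intro acc
    rw [List.foldl_cons]
    by_cases hc : s + p ≤ W
    · rw [if_pos hc, ih]
      rw [PySem.Set.mem_add]
      constructor
      · rintro (⟨h | h⟩ | ⟨u, hu, hx, hw⟩)
        · exact Or.inl h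
        · exact Or.inr ⟨s, by simp, h, hc⟩
        · exact Or.inr ⟨u, by simp [hu], hx, hw⟩
      · rintro (h | ⟨u, hu, hx, hw⟩)
        · exact Or.inl (Or.inl h)
        · rcases List.mem_cons.mp hu with h | h
          · exact Or.inl (Or.inr (by rw [hx, h]))
          · exact Or.inr ⟨u, h, hx, hw⟩
    · rw [if_neg hc, ih]
      constructor
      · rintro (h | ⟨u, hu, hx, hw⟩)
        · exact Or.inl h
        · exact Or.inr ⟨u, by simp [hu], hx, hw⟩
      · rintro (h | ⟨u, hu, hx, hw⟩)
        · exact Or.inl h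
        · rcases List.mem_cons.mp hu with h | h
          · exact absurd (h ▸ hw) hc
          · exact Or.inr ⟨u, h, hx, hw⟩

theorem mem_addLayer (W p x : Int) (R : PySem.Set Int) :
    x ∈ pvAddLayer W R p ↔ x ∈ R ∨ ∃ s ∈ R, x = s + p ∧ s + p ≤ W :=
  mem_addLayer_aux W p x R R

-- the invariant tying a reachable layer to pvBest
def InvL (P : List Int) (W : Int) (i : Nat) (R : PySem.Set Int) : Prop :=
  (0 : Int) ∈ R ∧ (∀ s ∈ R, 0 ≤ s ∧ s ≤ W) ∧
  ∀ j : Int, 0 ≤ j → j ≤ W → pvBest P i j ∈ R ∧ ∀ s ∈ R, s ≤ j → s ≤ pvBest P i j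

theorem pvInv_zero (P : List Int) (W : Int) (hW : 0 ≤ W) :
    InvL P W 0 (PySem.Set.ofList [0]) := by
  refine ⟨by simp [PySem.Set.mem_ofList], ?_, ?_⟩
  · intro s hs
    rw [PySem.Set.mem_ofList] at hs
    simp at hs
    omega
  · intro j hj _
    constructor
    · simp [pvBest, PySem.Set.mem_ofList]
    · intro s hs _
      rw [PySem.Set.mem_ofList] at hs
      simp at hs
      simp [pvBest, hs]

theorem inv_step (P : List Int) (W : Int) (hP : ∀ p ∈ P, 0 ≤ p)
    (i : Nat) (hi : i < P.length) (R : PySem.Set Int) (hR : InvL P W i R) :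
    InvL P W (i + 1) (pvAddLayer W R (P.getD i 0)) := by
  obtain ⟨h0, hbd, hbest⟩ := hR
  have hp0 : 0 ≤ P.getD i 0 := by
    apply hP
    rw [List.getD_eq_getElem?_getD, List.getElem?_eq_getElem hi]
    exact List.getElem_mem hi
  refine ⟨(mem_addLayer ..).mpr (Or.inl h0), ?_, ?_⟩
  · intro s hs
    rcases (mem_addLayer ..).mp hs with h | ⟨u, hu, hx, hw⟩
    · exact hbd s h
    · have := hbd u hu
      constructor <;> omega
  · intro j hj hjW
    have hrec : pvBest P (i + 1) j =
        if P.getD i 0 > j then pvBest P i j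
        else max (pvBest P i j) (pvBest P i (j - P.getD i 0) + P.getD i 0) := by
      rw [pvBest]
    constructor
    · -- pvBest (i+1) j is reachable
      rw [hrec]
      by_cases hc : P.getD i 0 > j
      · rw [if_pos hc]
        exact (mem_addLayer ..).mpr (Or.inl (hbest j hj hjW).1)
      · rw [if_neg hc]
        rcases max_cases (pvBest P i j) (pvBest P i (j - P.getD i 0) + P.getD i 0) with
          ⟨he, _⟩ | ⟨he, _⟩
        · rw [he]
          exact (mem_addLayer ..).mpr (Or.inl (hbest j hj hjW).1)
        · rw [he]
          have hmem : pvBest P i (j - P.getD i 0) ∈ R :=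
            (hbest (j - P.getD i 0) (by omega) (by omega)).1
          have hle : pvBest P i (j - P.getD i 0) ≤ j - P.getD i 0 :=
            pvBest_le P hP i (by omega) _ (by omega)
          exact (mem_addLayer ..).mpr (Or.inr ⟨_, hmem, rfl, by omega⟩)
    · -- every reachable sum ≤ j is ≤ pvBest (i+1) j
      intro s hs hsj
      have hmono : pvBest P i j ≤ pvBest P (i + 1) j := by
        rw [hrec]
        by_cases hc : P.getD i 0 > j
        · rw [if_pos hc]
        · rw [if_neg hc]; exact le_max_left _ _
      rcases (mem_addLayer ..).mp hs with h | ⟨u, hu, hx, _⟩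
      · exact le_trans ((hbest j hj hjW).2 s h hsj) hmono
      · have hu0 : 0 ≤ u := (hbd u hu).1
        have hpj : ¬ P.getD i 0 > j := by omega
        have huj : u ≤ j - P.getD i 0 := by omega
        have := (hbest (j - P.getD i 0) (by omega) (by omega)).2 u hu huj
        rw [hrec, if_neg hpj]
        have : s ≤ pvBest P i (j - P.getD i 0) + P.getD i 0 := by omega
        exact le_trans this (le_max_right _ _)

theorem inv_pure (P : List Int) (W : Int) (hW : 0 ≤ W) (hP : ∀ p ∈ P, 0 ≤ p) :
    ∀ i : Nat, i ≤ P.length → InvL P W i (pureLayer P W i) := by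
  intro i
  induction i with
  | zero => intro _; exact pvInv_zero P W hW
  | succ i ih =>
    intro hi
    exact inv_step P W hP i (by omega) _ (ih (by omega))

-- characterization of the _maxle fold
theorem maxle_fold (j : Int) :
    ∀ (l : List Int) (a : Int),
      (l.foldl (fun m s => if s ≤ j ∧ m < s then s else m) a = a ∨
        (l.foldl (fun m s => if s ≤ j ∧ m < s then s else m) a ∈ l ∧
         l.foldl (fun m s => if s ≤ j ∧ m < s then s else m) a ≤ j)) ∧
      a ≤ l.foldl (fun m s => if s ≤ j ∧ m < s then s else m) a ∧
      ∀ s ∈ l, s ≤ j → s ≤ l.foldl (fun m s => if s ≤ j ∧ m < s then s else m) a := by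
  intro l
  induction l with
  | nil => intro a; simp
  | cons s t ih =>
    intro a
    rw [List.foldl_cons]
    by_cases hc : s ≤ j ∧ a < s
    · rw [if_pos hc]
      obtain ⟨h1, h2, h3⟩ := ih s
      refine ⟨?_, by omega, ?_⟩
      · rcases h1 with h | ⟨hm, hj⟩
        · exact Or.inr ⟨by simp [h], by omega⟩
        · exact Or.inr ⟨by simp [hm], hj⟩
      · intro u hu huj
        rcases List.mem_cons.mp hu with h | h
        · subst h; exact h2
        · exact h3 u h huj
    · rw [if_neg hc]
      obtain ⟨h1, h2, h3⟩ := ih a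
      refine ⟨?_, h2, ?_⟩
      · rcases h1 with h | ⟨hm, hj⟩
        · exact Or.inl h
        · exact Or.inr ⟨by simp [hm], hj⟩
      · intro u hu huj
        rcases List.mem_cons.mp hu with h | h
        · subst h; omega
        · exact h3 u h huj

theorem maxle_eq (P : List Int) (W : Int) (hP : ∀ p ∈ P, 0 ≤ p)
    (i : Nat) (hi : i ≤ P.length) (R : PySem.Set Int) (hR : InvL P W i R)
    (j : Int) (hj : 0 ≤ j) (hjW : j ≤ W) :
    pvMaxle R j = pvBest P i j := by
  obtain ⟨_, _, hbest⟩ := hR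
  obtain ⟨hmem, hub⟩ := hbest j hj hjW
  obtain ⟨h1, h2, h3⟩ := maxle_fold j R 0
  have hble : pvBest P i j ≤ j := pvBest_le P hP i hi j hj
  have hblow : pvBest P i j ≤ pvMaxle R j := h3 _ hmem hble
  have hbhigh : pvMaxle R j ≤ pvBest P i j := by
    rcases h1 with h | ⟨hm, hle⟩
    · rw [pvMaxle, h]; exact pvBest_nonneg P i j hj
    · exact hub _ hm hle
  omega

-- the B fold builds exactly the pureLayer chain
theorem layers_fold (P : List Int) (W : Int) :
    ∀ (rest : List Int) (i0 : Nat), rest = P.drop i0 →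
      rest.foldl (pvLayersStep W)
        ((List.range (i0 + 1)).map (pureLayer P W), pureLayer P W i0) =
      ((List.range (i0 + rest.length + 1)).map (pureLayer P W),
        pureLayer P W (i0 + rest.length)) := by
  intro rest
  induction rest with
  | nil => intro i0 _; simp
  | cons p rest' ih =>
    intro i0 hrest
    have hi0 : i0 < P.length := by
      by_contra h
      rw [List.drop_eq_nil_of_le (by omega)] at hrest
      simp at hrest
    have hdrop : P.drop i0 = P[i0] :: P.drop (i0 + 1) := List.drop_eq_getElem_cons hi0
    rw [hdrop] at hrest
    have hp : p = P.getD i0 0 := by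
      rw [List.getD_eq_getElem?_getD, List.getElem?_eq_getElem hi0]
      exact (List.cons.injEq .. ▸ hrest).1
    have hrest' : rest' = P.drop (i0 + 1) := (List.cons.injEq .. ▸ hrest).2
    rw [List.foldl_cons]
    have hstep : pvLayersStep W ((List.range (i0 + 1)).map (pureLayer P W), pureLayer P W i0) p =
        ((List.range (i0 + 2)).map (pureLayer P W), pureLayer P W (i0 + 1)) := by
      simp only [pvLayersStep]
      have hr : pvAddLayer W (pureLayer P W i0) p = pureLayer P W (i0 + 1) := by
        rw [hp]; rfl
      rw [hr]
      simp [List.range_succ]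
    rw [hstep]
    have hrec := ih (i0 + 1) hrest'
    rw [show i0 + 1 + 1 = i0 + 2 from rfl] at hrec
    have e : i0 + 1 + rest'.length = i0 + (p :: rest').length := by
      simp only [List.length_cons]; omega
    rw [e] at hrec
    exact hrec

theorem pureLayers_getD (P : List Int) (W : Int) (k : Nat) (hk : k ≤ P.length) :
    ((List.range (P.length + 1)).map (pureLayer P W)).getD k PySem.Set.empty =
      pureLayer P W k := by
  rw [List.getD_eq_getElem?_getD, List.getElem?_map, List.getElem?_range (by omega)]
  rfl

-- the two reconstructions walk in lockstep
theorem pvWalkEq (P : List Int) (W : Int) (hW : 0 ≤ W) (hP : ∀ p ∈ P, 0 ≤ p) :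
    ∀ (i : Nat), i ≤ P.length → ∀ (j : Int), j ≤ W → ∀ (acc : List Int),
      pvRecon P (pvDp P W) i j acc =
      pvPickB P ((List.range (P.length + 1)).map (pureLayer P W)) i j acc := by
  intro i
  induction i with
  | zero => intro _ j _ acc; rfl
  | succ i ih =>
    intro hi j hj acc
    have hilen : i < P.length := by omega
    have hp0 : 0 ≤ P.getD i 0 := by
      apply hP
      rw [List.getD_eq_getElem?_getD, List.getElem?_eq_getElem hilen]
      exact List.getElem_mem hilen
    simp only [pvRecon, pvPickB]
    by_cases hj0 : 0 < j
    · rw [if_pos hj0, if_neg (show ¬ j ≤ 0 by omega)]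
      have hjt : j.toNat < (W + 1).toNat := by omega
      have hcast : ((j.toNat : Int)) = j := by omega
      have hA1 : ((pvDp P W).getD (i + 1) []).getD j.toNat 0 = pvBest P (i + 1) j := by
        rw [pvDp_getD P W hP (i + 1) hi j.toNat hjt, hcast]
      have hA0 : ((pvDp P W).getD i []).getD j.toNat 0 = pvBest P i j := by
        rw [pvDp_getD P W hP i (by omega) j.toNat hjt, hcast]
      have hB1 : pvMaxle (((List.range (P.length + 1)).map (pureLayer P W)).getD (i + 1) PySem.Set.empty) j
          = pvBest P (i + 1) j := by
        rw [pureLayers_getD P W (i + 1) hi]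
        exact maxle_eq P W hP (i + 1) hi _ (inv_pure P W hW hP (i + 1) hi) j (by omega) hj
      have hB0 : pvMaxle (((List.range (P.length + 1)).map (pureLayer P W)).getD i PySem.Set.empty) j
          = pvBest P i j := by
        rw [pureLayers_getD P W i (by omega)]
        exact maxle_eq P W hP i (by omega) _ (inv_pure P W hW hP i (by omega)) j (by omega) hj
      rw [hA1, hA0, hB1, hB0]
      by_cases hc : pvBest P (i + 1) j ≠ pvBest P i j
      · rw [if_pos hc, if_pos hc]
        exact ih (by omega) (j - P.getD i 0) (by omega) (acc ++ [P.getD i 0])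
      · rw [if_neg hc, if_neg hc]
        exact ih (by omega) j hj acc
    · rw [if_neg hj0, if_pos (show j ≤ 0 by omega)]

theorem pvRecon_nonpos (P : List Int) (dp : List (List Int)) (i : Nat) (j : Int)
    (acc : List Int) (hj : j ≤ 0) : pvRecon P dp i j acc = acc := by
  cases i with
  | zero => rfl
  | succ i => simp [pvRecon, show ¬ 0 < j by omega]

-- ===== VERDICT (by name: the statement is the Claim_ definition above) =====
theorem bodegon_dinamico_spec : Claim_equal_bodegon_dinamico := by
  intro P W _ hpre
  unfold Spec_bodegon_dinamico bodegon_dinamico bodegon_dinamico_alt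
  by_cases hW : 0 ≤ W
  · simp only [show ¬ W < 0 by omega, if_false]
    have hfold := layers_fold P W P 0 (by simp)
    simp only [Nat.zero_add] at hfold
    have hinit : ((List.range (0 + 1)).map (pureLayer P W), pureLayer P W 0) =
        (([PySem.Set.ofList [0]], PySem.Set.ofList [0]) :
          List (PySem.Set Int) × PySem.Set Int) := by rfl
    rw [hinit] at hfold
    rw [hfold]
    rw [pvWalkEq P W hW (hpre hW) P.length le_rfl W le_rfl []]
  · rw [if_pos (by omega), pvRecon_nonpos P _ _ _ _ (by omega)]
    rfl
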